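-- pv_equiv track=rewrite | github.com/svidenovic/mode-chordsProg-gen | vModeProgCalculator_.py | gen_prog_arr_
-- ===== SOURCE A (Python) =====
-- chromatic_scale = ['A','A#','B','C','C#','D','D#','E','F','F#','G','G#'];
--
-- intervals = [2,2,1,2,2,2,1];
--
-- def gen_prog_arr_( start_note, key ):
-- 	chord_triad = ["","m","m","","","m","dim"];
-- 	prog_arr = [];
-- 	start_note_idx = 0;
-- 	while 1:
-- 		if chromatic_scale[start_note_idx] == start_note:
-- 			break;
-- 		else:
-- 			start_note_idx += 1;
-- 	csi = start_note_idx;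
-- 	for i in range(0,len(intervals)):
-- 		prog_arr.append( chromatic_scale[csi]+chord_triad[i]+"/"+key );
-- 		csi += intervals[i];
-- 		if csi >= len(chromatic_scale):
-- 			csi -= len(chromatic_scale);
-- 	return prog_arr;
-- ===== SOURCE B (Python) =====
-- chromatic_scale = ['A','A#','B','C','C#','D','D#','E','F','F#','G','G#']
--
-- def gen_prog_arr_(start_note, key):
--     chord_triad = ["", "m", "m", "", "", "m", "dim"]
--     # major-scale membership mask over one octave (tone-tone-semitone pattern)
--     mask = [True, False, True, False, True, True, False, True, False, True, False, True]
--     s = chromatic_scale.index(start_note)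
--     rotated = chromatic_scale[s:] + chromatic_scale[:s]
--     scale_notes = [note for note, keep in zip(rotated, mask) if keep]
--     return [note + triad + "/" + key for note, triad in zip(scale_notes, chord_triad)]
-- ===== Notes on version B (the rewrite author's own statement) =====
-- stated objective: alternative
-- what changed: Instead of stepping a running chromatic index by interval amounts with manual wraparound, B rotates the chromatic scale by list slicing so the root comes first, selects the seven scale notes with a fixed boolean membership mask (no index arithmetic at all), and zips them with the triad qualities.
import Mathlib
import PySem

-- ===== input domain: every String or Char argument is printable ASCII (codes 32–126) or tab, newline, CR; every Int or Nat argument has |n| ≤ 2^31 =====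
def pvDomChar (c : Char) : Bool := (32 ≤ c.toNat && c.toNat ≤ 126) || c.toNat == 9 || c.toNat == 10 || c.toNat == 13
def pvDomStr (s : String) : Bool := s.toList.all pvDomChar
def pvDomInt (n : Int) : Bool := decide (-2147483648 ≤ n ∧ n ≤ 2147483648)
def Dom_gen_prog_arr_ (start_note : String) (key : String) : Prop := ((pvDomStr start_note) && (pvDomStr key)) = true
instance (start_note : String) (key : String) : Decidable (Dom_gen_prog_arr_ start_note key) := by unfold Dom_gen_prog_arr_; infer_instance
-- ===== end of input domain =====

-- B replaces A's while-loop scan plus stepped running index with a slice rotation of the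
-- chromatic scale, a fixed boolean scale-membership mask, and zips (objective: alternative).

-- ===== PORT A =====
def pvChromatic : List String := ["A","A#","B","C","C#","D","D#","E","F","F#","G","G#"]
def pvIntervals : List Int := [2,2,1,2,2,2,1]

-- the 'while 1' scan; chromatic_scale[idx] raises IndexError (pyGet? = none) at idx = 12,
-- so fuel 13 is exact; none = A raises
def pvFindLoop (start_note : String) : Nat → Nat → Option Nat
  | 0, _ => none
  | fuel+1, idx =>
    match PySem.List.pyGet? pvChromatic (idx : Int) with
    | none => none
    | some s => if s = start_note then some idx else pvFindLoop start_note fuel (idx+1)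

def gen_prog_arr_ (start_note : String) (key : String) : List String :=
  let chord_triad : List String := ["","m","m","","","m","dim"]
  match pvFindLoop start_note 13 0 with
  | none => []  -- A raises IndexError here (excluded by Pre_)
  | some start_note_idx =>
    let st := (PySem.List.pyRange 0 (pvIntervals.length) 1).foldl
      (fun (st : Int × List String) i =>
        let csi := st.1
        let note := (PySem.List.pyGet? pvChromatic csi).getD ""
        let tri := (PySem.List.pyGet? chord_triad i).getD ""
        let iv := (PySem.List.pyGet? pvIntervals i).getD 0
        let csi' := csi + iv
        let csi'' := if csi' ≥ (pvChromatic.length : Int) then csi' - pvChromatic.length else csi'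
        (csi'', st.2 ++ [note ++ tri ++ "/" ++ key]))
      (((start_note_idx : Int)), ([] : List String))
    st.2

-- ===== PORT B =====
def gen_prog_arr__alt (start_note : String) (key : String) : List String :=
  let chord_triad : List String := ["","m","m","","","m","dim"]
  let mask : List Bool := [true,false,true,false,true,true,false,true,false,true,false,true]
  match PySem.List.index? pvChromatic start_note with
  | none => []  -- B raises ValueError here (excluded by Pre_)
  | some s =>
    let rotated := PySem.List.slice pvChromatic (some (s : Int)) none
                   ++ PySem.List.slice pvChromatic none (some (s : Int))
    let scale_notes := ((rotated.zip mask).filter (fun p => p.2)).map (fun p => p.1)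
    (scale_notes.zip chord_triad).map (fun p => p.1 ++ p.2 ++ "/" ++ key)

-- ===== PRECONDITION & SPEC =====
-- Pre_ excludes start notes not in the chromatic scale, on which A raises IndexError
-- (its scan runs off the end of the list) and B raises ValueError (list.index).
def Pre_gen_prog_arr_ (start_note : String) (key : String) : Prop :=
  start_note ∈ pvChromatic
instance (start_note : String) (key : String) : Decidable (Pre_gen_prog_arr_ start_note key) := by unfold Pre_gen_prog_arr_; infer_instance
def pvWitness_gen_prog_arr_ : String × String := ("C", "Cmaj")

def Spec_gen_prog_arr_ (start_note : String) (key : String) (out : List String) : Prop := out = gen_prog_arr__alt start_note key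
instance (start_note : String) (key : String) (out : List String) : Decidable (Spec_gen_prog_arr_ start_note key out) := by unfold Spec_gen_prog_arr_; infer_instance

-- ===== CLAIM (what is proved, stated in full; the proofs are below) =====
def Claim_equal_gen_prog_arr_ : Prop := ∀ (start_note : String) (key : String), Dom_gen_prog_arr_ start_note key → Pre_gen_prog_arr_ start_note key → Spec_gen_prog_arr_ start_note key (gen_prog_arr_ start_note key)

-- ===== LEMMAS AND PROOFS =====

theorem gen_prog_arr__per_note (n : String) (hn : n ∈ pvChromatic) (key : String) :
    gen_prog_arr_ n key = gen_prog_arr__alt n key := by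
  fin_cases hn <;> rfl

-- ===== VERDICT (by name: the statement is the Claim_ definition above) =====
theorem gen_prog_arr__spec : Claim_equal_gen_prog_arr_ := by
  intro start_note key _ hpre
  exact gen_prog_arr__per_note start_note hpre key
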